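-- pv_equiv track=rewrite | github.com/HighDiceRoller/icepool | src/icepool/order.py | lo_hi_skip
-- ===== SOURCE A (Python) =====
-- def lo_hi_skip(keep_tuple: tuple[int, ...]) -> tuple[int, int]:
--     """The number of dice that can be skipped from the ends of keep_tuple.
--
--     Returns:
--         lo_skip: The number of dice that can be skipped on the low side.
--         hi_skip: The number of dice that can be skipped on the high side.
--     """
--     for lo_skip, count in enumerate(keep_tuple):
--         if count:
--             break
--     else:
--         return len(keep_tuple), len(keep_tuple)
--
--     for hi_skip, count in enumerate(reversed(keep_tuple)):
--         if count:
--             return lo_skip, hi_skip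
--
--     # Should never reach here.
--     raise RuntimeError('Should not be reached.')
-- ===== SOURCE B (Python) =====
-- def lo_hi_skip(keep_tuple: tuple[int, ...]) -> tuple[int, int]:
--     """The number of dice that can be skipped from the ends of keep_tuple."""
--     nz = [i for i, c in enumerate(keep_tuple) if c]
--     if not nz:
--         return len(keep_tuple), len(keep_tuple)
--     return nz[0], len(keep_tuple) - 1 - nz[-1]
-- ===== Notes on version B (the rewrite author's own statement) =====
-- stated objective: simpler
-- what changed: Replaces A's two end-anchored early-break scans (one over the tuple, one over its reverse) by a single forward pass that collects the indices of nonzero counts and reads both answers off the first and last collected index.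
import Mathlib
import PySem

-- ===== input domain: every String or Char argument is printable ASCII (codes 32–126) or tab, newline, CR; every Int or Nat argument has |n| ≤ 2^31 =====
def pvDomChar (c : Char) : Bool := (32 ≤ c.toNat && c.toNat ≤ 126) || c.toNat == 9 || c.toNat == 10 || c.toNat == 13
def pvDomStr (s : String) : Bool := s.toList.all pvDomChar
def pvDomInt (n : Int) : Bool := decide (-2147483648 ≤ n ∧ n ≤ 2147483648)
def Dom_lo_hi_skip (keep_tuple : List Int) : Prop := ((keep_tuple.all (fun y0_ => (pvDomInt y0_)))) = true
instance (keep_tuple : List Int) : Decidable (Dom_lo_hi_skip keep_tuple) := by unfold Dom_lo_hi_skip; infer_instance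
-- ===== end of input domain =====

-- B collects all nonzero indices in one forward pass instead of A's two early-break scans; objective: simpler.

-- ===== PORT A =====
-- first loop / second loop of A: scan with running index, return the index of the
-- first truthy count (none = loop fell through).
def pvFindNZ : List Int → Int → Option Int
  | [], _ => none
  | c :: rest, i => if c ≠ 0 then some i else pvFindNZ rest (i + 1)

def lo_hi_skip (keep_tuple : List Int) : Int × Int :=
  match pvFindNZ keep_tuple 0 with
  | none => ((keep_tuple.length : Int), (keep_tuple.length : Int))
  | some lo_skip =>
    match pvFindNZ keep_tuple.reverse 0 with
    | some hi_skip => (lo_skip, hi_skip)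
    -- 'Should never be reached' in A (a nonzero exists); arbitrary value here
    | none => (lo_skip, 0)

-- ===== PORT B =====
-- the comprehension [i for i, c in enumerate(keep_tuple) if c]
def pvNzIdx : List Int → Int → List Int
  | [], _ => []
  | c :: rest, i => if c ≠ 0 then i :: pvNzIdx rest (i + 1) else pvNzIdx rest (i + 1)

def lo_hi_skip_alt (keep_tuple : List Int) : Int × Int :=
  match pvNzIdx keep_tuple 0 with
  | [] => ((keep_tuple.length : Int), (keep_tuple.length : Int))
  | j :: rest => (j, (keep_tuple.length : Int) - 1 - (j :: rest).getLast (by simp))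

-- ===== PRECONDITION & SPEC =====
def Spec_lo_hi_skip (keep_tuple : List Int) (out : Int × Int) : Prop := out = lo_hi_skip_alt keep_tuple
instance (keep_tuple : List Int) (out : Int × Int) : Decidable (Spec_lo_hi_skip keep_tuple out) := by unfold Spec_lo_hi_skip; infer_instance

-- ===== CLAIM (what is proved, stated in full; the proofs are below) =====
def Claim_equal_lo_hi_skip : Prop := ∀ (keep_tuple : List Int), Dom_lo_hi_skip keep_tuple → Spec_lo_hi_skip keep_tuple (lo_hi_skip keep_tuple)

-- ===== LEMMAS AND PROOFS =====

theorem pvFindNZ_eq_head (l : List Int) (i : Int) :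
    pvFindNZ l i = (pvNzIdx l i).head? := by
  induction l generalizing i with
  | nil => rfl
  | cons c rest ih =>
    simp only [pvFindNZ, pvNzIdx]
    split_ifs <;> simp [ih]

theorem pvNzIdx_shift (l : List Int) (i : Int) :
    pvNzIdx l i = (pvNzIdx l 0).map (fun j => j + i) := by
  induction l generalizing i with
  | nil => rfl
  | cons c rest ih =>
    simp only [pvNzIdx]
    split_ifs with h <;>
    · rw [ih (i + 1), ih (0 + 1)]
      simp only [List.map_map, List.map_cons]
      first
      | (refine List.cons_eq_cons.mpr ⟨by ring, ?_⟩; congr 1; funext j;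
         simp only [Function.comp_apply]; ring)
      | (congr 1; funext j; simp only [Function.comp_apply]; ring)

theorem pvNzIdx_append (l m : List Int) (i : Int) :
    pvNzIdx (l ++ m) i = pvNzIdx l i ++ pvNzIdx m (i + l.length) := by
  induction l generalizing i with
  | nil => simp [pvNzIdx]
  | cons c rest ih =>
    simp only [List.cons_append, pvNzIdx, ih]
    split_ifs <;> simp <;> ring_nf

theorem pvNzIdx_reverse_head (l : List Int) :
    (pvNzIdx l.reverse 0).head? =
      (pvNzIdx l 0).getLast?.map (fun j => (l.length : Int) - 1 - j) := by
  induction l using List.reverseRecOn with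
  | nil => rfl
  | append_singleton l' c ih =>
    rw [List.reverse_append]
    simp only [List.reverse_singleton, List.singleton_append, pvNzIdx]
    split_ifs with h
    · -- last element nonzero
      rw [pvNzIdx_append]
      simp [pvNzIdx, h]
    · rw [pvNzIdx_append]
      simp only [pvNzIdx, h, ite_false]
      simp only [show (0:Int) + 1 = 1 from rfl]
      rw [pvNzIdx_shift l'.reverse 1]
      simp only [List.head?_map, ih]
      simp only [List.append_nil]
      cases hl : (pvNzIdx l' 0).getLast? with
      | none => simp
      | some j =>
        simp only [Option.map_some]
        congr 1
        simp
        omega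

-- ===== VERDICT (by name: the statement is the Claim_ definition above) =====
theorem lo_hi_skip_spec : Claim_equal_lo_hi_skip := by
  intro kt _
  unfold Spec_lo_hi_skip lo_hi_skip lo_hi_skip_alt
  rw [pvFindNZ_eq_head, pvFindNZ_eq_head, pvNzIdx_reverse_head]
  cases h : pvNzIdx kt 0 with
  | nil => simp
  | cons j rest =>
    rw [List.getLast?_eq_some_getLast (l := j :: rest) (by simp)]
    simp
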